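-- pv_equiv track=rewrite | github.com/tubeslave/AUTO-MIXER-Tubeslave | src/experiments/muq_eval_director.py | _aggregate_model_status
-- ===== SOURCE A (Python) =====
-- from typing import Any, Iterable, Optional
--
-- def _aggregate_model_status(statuses: Iterable[str]) -> str:
--     normalized = [str(status or "unknown") for status in statuses]
--     if not normalized:
--         return "unknown"
--     unique = set(normalized)
--     if unique == {"available"}:
--         return "available"
--     if len(unique) == 1:
--         return normalized[0]
--     return "mixed"
-- ===== SOURCE B (Python) =====
-- def _aggregate_model_status(statuses):
--     first = None
--     all_same = True
--     for status in statuses: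
--         s = str(status or "unknown")
--         if first is None:
--             first = s
--         elif s != first:
--             all_same = False
--     if first is None:
--         return "unknown"
--     return first if all_same else "mixed"
-- ===== Notes on version B (the rewrite author's own statement) =====
-- stated objective: simpler
-- what changed: Single fold tracking the first normalized status and an all-same flag instead of materializing the normalized list and a set; the redundant {'available'} special case disappears.
import Mathlib
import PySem

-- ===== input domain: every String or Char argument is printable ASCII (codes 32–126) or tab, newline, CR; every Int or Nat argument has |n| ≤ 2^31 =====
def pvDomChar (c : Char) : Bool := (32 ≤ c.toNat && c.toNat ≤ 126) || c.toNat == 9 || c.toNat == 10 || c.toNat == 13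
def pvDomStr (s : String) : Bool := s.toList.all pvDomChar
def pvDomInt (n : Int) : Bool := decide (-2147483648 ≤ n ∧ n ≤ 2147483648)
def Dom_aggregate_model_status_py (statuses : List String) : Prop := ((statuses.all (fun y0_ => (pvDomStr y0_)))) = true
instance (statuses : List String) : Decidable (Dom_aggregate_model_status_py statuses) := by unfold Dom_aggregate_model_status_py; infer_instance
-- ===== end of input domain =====

-- B is a simpler one-pass fold (first element + all-same flag, O(1) extra space) replacing A's normalized list + set; same return value everywhere.

-- ===== PORT A =====
-- str(status or "unknown"): a falsy (empty) string becomes "unknown"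
def pvNorm (status : String) : String := if status == "" then "unknown" else status

def aggregate_model_status_py (statuses : List String) : String :=
  let normalized := statuses.map (fun status => pvNorm status)
  if normalized = [] then "unknown"
  else
    let unique : PySem.Set String := PySem.Set.ofList normalized
    if PySem.Set.equal unique (PySem.Set.ofList ["available"]) then "available"
    else if PySem.Set.len unique = 1 then PySem.List.pyGetD normalized 0 ""
    else "mixed"

-- ===== PORT B =====
def aggregate_model_status_py_alt (statuses : List String) : String :=
  let r := statuses.foldl
    (fun (acc : Option String × Bool) status =>
      let s := if status == "" then "unknown" else status
      match acc with
      | (none, _) => (some s, true)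
      | (some f, allSame) => (some f, allSame && (s == f)))
    (none, true)
  match r with
  | (none, _) => "unknown"
  | (some f, allSame) => if allSame then f else "mixed"

-- ===== PRECONDITION & SPEC =====
def Spec_aggregate_model_status_py (statuses : List String) (out : String) : Prop := out = aggregate_model_status_py_alt statuses
instance (statuses : List String) (out : String) : Decidable (Spec_aggregate_model_status_py statuses out) := by unfold Spec_aggregate_model_status_py; infer_instance

-- ===== CLAIM (what is proved, stated in full; the proofs are below) =====
def Claim_equal_aggregate_model_status_py : Prop := ∀ (statuses : List String), Dom_aggregate_model_status_py statuses → Spec_aggregate_model_status_py statuses (aggregate_model_status_py statuses)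

-- ===== LEMMAS AND PROOFS =====

-- B's loop, once the first element is fixed: fst stays `some f`, snd records whether every later normalized status equals f.
theorem pv_alt_loop (l : List String) (f : String) (b : Bool) :
    l.foldl
      (fun (acc : Option String × Bool) status =>
        let s := if status == "" then "unknown" else status
        match acc with
        | (none, _) => (some s, true)
        | (some f, allSame) => (some f, allSame && (s == f)))
      (some f, b)
    = (some f, b && l.all (fun status => pvNorm status == f)) := by
  induction l generalizing b with
  | nil => simp
  | cons x xs ih =>
      simp only [List.foldl_cons, List.all_cons, ih, pvNorm]
      rw [Bool.and_assoc]

-- B on a nonempty list: first normalized element if all agree with it, else "mixed".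
theorem pv_alt_cons (x : String) (xs : List String) :
    aggregate_model_status_py_alt (x :: xs)
    = if xs.all (fun status => pvNorm status == pvNorm x) then pvNorm x else "mixed" := by
  unfold aggregate_model_status_py_alt
  simp only [List.foldl_cons, pvNorm, pv_alt_loop, Bool.true_and]

-- A nodup list all of whose members equal a, containing a, is [a].
theorem pv_nodup_const {a : String} {s : List String} (hn : s.Nodup)
    (hm : a ∈ s) (hall : ∀ y ∈ s, y = a) : s = [a] := by
  cases s with
  | nil => cases hm
  | cons z zs =>
      have hz : z = a := hall z (by simp)
      cases zs with
      | nil => simp [hz]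
      | cons w ws =>
          exfalso
          have hw : w = a := hall w (by simp)
          rw [List.nodup_cons] at hn
          exact hn.1 (by simp [hz, hw])

theorem pv_len_one_iff (x : String) (xs : List String) :
    (PySem.Set.ofList (x :: xs)).length = 1 ↔ ∀ y ∈ xs, y = x := by
  constructor
  · intro h y hy
    obtain ⟨z, hz⟩ : ∃ z, PySem.Set.ofList (x :: xs) = [z] := by
      cases hs : PySem.Set.ofList (x :: xs) with
      | nil => rw [hs] at h; simp at h
      | cons a t =>
          rw [hs] at h
          cases t with
          | nil => exact ⟨a, rfl⟩
          | cons b u => simp at h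
    have hx : x ∈ PySem.Set.ofList (x :: xs) := (PySem.Set.mem_ofList _ _).2 (by simp)
    have hy' : y ∈ PySem.Set.ofList (x :: xs) := (PySem.Set.mem_ofList _ _).2 (by simp [hy])
    rw [hz] at hx hy'
    simp at hx hy'
    rw [hy', hx]
  · intro hall
    have : PySem.Set.ofList (x :: xs) = [x] :=
      pv_nodup_const (PySem.Set.nodup_ofList _)
        ((PySem.Set.mem_ofList _ _).2 (by simp))
        (fun y hy => by
          rcases List.mem_cons.1 ((PySem.Set.mem_ofList _ _).1 hy) with h | h
          · exact h
          · exact hall y h)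
    rw [this]
    rfl

theorem pv_equal_avail_iff (x : String) (xs : List String) :
    PySem.Set.equal (PySem.Set.ofList (x :: xs)) (PySem.Set.ofList ["available"]) = true
    ↔ (x = "available" ∧ ∀ y ∈ xs, y = x) := by
  rw [PySem.Set.equal_iff]
  constructor
  · intro h
    have hx : x = "available" := by
      have := (h x).1 (by simp [PySem.Set.mem_ofList])
      simpa [PySem.Set.mem_ofList] using this
    refine ⟨hx, fun y hy => ?_⟩
    have := (h y).1 (by simp [PySem.Set.mem_ofList, hy])
    simp [PySem.Set.mem_ofList] at this
    rw [this, hx]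
  · rintro ⟨hx, hall⟩ z
    simp only [PySem.Set.mem_ofList, List.mem_cons]
    constructor
    · rintro (h | h)
      · simp [h, hx]
      · have := hall z h; simp [this, hx]
    · intro h
      simp only [List.mem_nil_iff, or_false] at h
      simp [h, hx]

-- ===== VERDICT (by name: the statement is the Claim_ definition above) =====
theorem aggregate_model_status_py_spec : Claim_equal_aggregate_model_status_py := by
  intro statuses _
  unfold Spec_aggregate_model_status_py
  cases statuses with
  | nil => rfl
  | cons x xs =>
      rw [pv_alt_cons]
      unfold aggregate_model_status_py
      simp only [List.map_cons, PySem.Set.len, Nat.cast_eq_one]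
      by_cases havail : PySem.Set.equal (PySem.Set.ofList (pvNorm x :: xs.map (fun s => pvNorm s))) (PySem.Set.ofList ["available"]) = true
      · rw [if_neg (by simp), if_pos havail]
        rcases (pv_equal_avail_iff _ _).1 havail with ⟨hx, hall⟩
        have : xs.all (fun status => pvNorm status == pvNorm x) = true := by
          simp only [List.all_eq_true, beq_iff_eq]
          intro s hs
          exact hall (pvNorm s) (by simp; exact ⟨s, hs, rfl⟩)
        rw [if_pos this, hx]
      · rw [if_neg (by simp), if_neg havail]
        by_cases hlen : (PySem.Set.ofList (pvNorm x :: xs.map (fun s => pvNorm s))).length = 1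
        · rw [if_pos hlen]
          have hall := (pv_len_one_iff _ _).1 hlen
          have : xs.all (fun status => pvNorm status == pvNorm x) = true := by
            simp only [List.all_eq_true, beq_iff_eq]
            intro s hs
            exact hall (pvNorm s) (by simp; exact ⟨s, hs, rfl⟩)
          rw [if_pos this]
          simp [PySem.List.pyGetD, PySem.List.pyGet?, PySem.List.pyIdx?]
        · rw [if_neg hlen]
          have : ¬ xs.all (fun status => pvNorm status == pvNorm x) = true := by
            intro hall
            apply hlen
            apply (pv_len_one_iff _ _).2
            intro y hy
            simp only [List.mem_map] at hy
            obtain ⟨s, hs, rfl⟩ := hy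
            have := (List.all_eq_true.1 hall) s hs
            simpa using this
          rw [if_neg this]
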